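-- pv_equiv track=rewrite | github.com/AHDABOSAMA/ai-code-review-assignment | correct_task2.py | count_valid_emails
-- ===== SOURCE A (Python) =====
-- def count_valid_emails(emails):
--     count = 0
--
--     for email in emails:
--         if not isinstance(email, str):
--             continue
--
--         email = email.strip()
--
--         if not email:
--             continue
--
--         if email.count("@") != 1:
--             continue
--
--         local, domain = email.split("@")
--
--         if not local or not domain:
--             continue
--
--         if "." not in domain:
--             continue
--
--         count += 1
--
--     return count
-- ===== SOURCE B (Python) =====
-- def count_valid_emails(emails):
--     count = 0
--     for email in emails:
--         if not isinstance(email, str):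
--             continue
--         s = email.strip()
--         at = -1          # index of the single '@' seen so far, -1 if none
--         dot = False      # a '.' seen after the '@'
--         ok = True        # no second '@' encountered
--         for i, c in enumerate(s):
--             if c == '@':
--                 if at >= 0:
--                     ok = False
--                     break
--                 at = i
--             elif c == '.' and at >= 0:
--                 dot = True
--         if ok and at > 0 and at < len(s) - 1 and dot:
--             count += 1
--     return count
-- ===== Notes on version B (the rewrite author's own statement) =====
-- stated objective: alternative
-- what changed: B replaces A's count('@')/split('@')/'.' in domain substring checks by a single left-to-right character scan per email that tracks the '@' position, a dot-after-'@' flag and a second-'@' abort, then validates with index arithmetic.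
import Mathlib
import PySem

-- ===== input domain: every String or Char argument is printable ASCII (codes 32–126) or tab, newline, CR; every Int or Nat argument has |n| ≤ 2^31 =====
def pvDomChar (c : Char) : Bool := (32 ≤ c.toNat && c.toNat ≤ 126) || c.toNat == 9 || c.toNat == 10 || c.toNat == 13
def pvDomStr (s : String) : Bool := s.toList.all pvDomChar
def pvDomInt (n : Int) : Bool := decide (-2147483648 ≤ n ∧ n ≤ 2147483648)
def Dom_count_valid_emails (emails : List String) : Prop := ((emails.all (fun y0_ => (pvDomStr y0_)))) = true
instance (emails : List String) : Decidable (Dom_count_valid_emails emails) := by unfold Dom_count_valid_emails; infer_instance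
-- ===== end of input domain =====

-- B does one character scan per email instead of A's count/split/substring passes; same result, similar cost.
-- String functions are ported on the List Char side (PySem.Chars = the definitions behind PySem.Str).

-- ===== PORT A =====
-- the per-email body of A's loop, applied to email.strip(): A's guard chain with 'continue' = nested ifs
def pvAOk (s : List Char) : Bool :=
  if s.isEmpty then false                                   -- if not email: continue
  else if PySem.Chars.count s ['@'] != 1 then false         -- if email.count("@") != 1: continue
  else
    let parts := PySem.Chars.splitOn s ['@']                -- local, domain = email.split("@")  (count==1 ⇒ 2 parts)
    let lo := parts.getD 0 []
    let dom := parts.getD 1 []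
    if lo.isEmpty || dom.isEmpty then false                 -- if not local or not domain: continue
    else PySem.Chars.isIn ['.'] dom                         -- if "." not in domain: continue

def count_valid_emails (emails : List String) : Int :=
  emails.foldl (fun count email =>
    if pvAOk (PySem.Chars.strip email.toList) then count + 1 else count) 0

-- ===== PORT B =====
-- B's inner for-loop: state (at, dot) and position pos; returns (at, dot, ok), ok = false is the 'break'
def pvScan : List Char → Int → Int → Bool → Int × Bool × Bool
  | [], _, at_, dot => (at_, dot, true)
  | c :: rest, pos, at_, dot =>
    if c == '@' then
      if 0 ≤ at_ then (at_, dot, false)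
      else pvScan rest (pos + 1) pos dot
    else if c == '.' && 0 ≤ at_ then pvScan rest (pos + 1) at_ true
    else pvScan rest (pos + 1) at_ dot

def pvBOk (s : List Char) : Bool :=
  let r := pvScan s 0 (-1) false
  r.2.2 && decide (0 < r.1) && decide (r.1 < (s.length : Int) - 1) && r.2.1

def count_valid_emails_alt (emails : List String) : Int :=
  emails.foldl (fun count email =>
    if pvBOk (PySem.Chars.strip email.toList) then count + 1 else count) 0

-- ===== PRECONDITION & SPEC =====
def Spec_count_valid_emails (emails : List String) (out : Int) : Prop := out = count_valid_emails_alt emails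
instance (emails : List String) (out : Int) : Decidable (Spec_count_valid_emails emails out) := by unfold Spec_count_valid_emails; infer_instance

-- ===== CLAIM (what is proved, stated in full; the proofs are below) =====
def Claim_equal_count_valid_emails : Prop := ∀ (emails : List String), Dom_count_valid_emails emails → Spec_count_valid_emails emails (count_valid_emails emails)

-- ===== LEMMAS AND PROOFS =====

-- A-side: count.go with the single-char pattern ['@'] counts occurrences of '@'
theorem pv_count_go (fuel : Nat) (l : List Char) (acc : Nat) (h : l.length ≤ fuel) :
    PySem.Chars.count.go ['@'] fuel l acc = acc + l.count '@' := by
  induction fuel generalizing l acc with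
  | zero =>
    have : l = [] := by cases l <;> simp_all
    subst this; simp [PySem.Chars.count.go]
  | succ n ih =>
    cases l with
    | nil => simp [PySem.Chars.count.go]
    | cons c t =>
      simp only [PySem.Chars.count.go]
      by_cases hc : c = '@'
      · subst hc
        rw [if_pos (by simp [List.isPrefixOf])]
        simp only [List.length_singleton, List.drop_one, List.tail_cons]
        rw [ih t (acc+1) (by simpa using Nat.le_of_succ_le_succ h)]
        simp
        omega
      · rw [if_neg (by simp [List.isPrefixOf]; exact fun h' => hc h'.symm)]
        rw [ih t acc (by simpa using Nat.le_of_succ_le_succ h)]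
        simp [hc]

theorem pv_count_at (s : List Char) : PySem.Chars.count s ['@'] = s.count '@' := by
  simp [PySem.Chars.count, pv_count_go s.length s 0 le_rfl]

-- A-side: splitOn.go on a chunk without the separator
theorem pv_split_go_none (fuel : Nat) (l cur : List Char) (acc : List (List Char))
    (hm : '@' ∉ l) (h : l.length ≤ fuel) :
    PySem.Chars.splitOn.go ['@'] fuel l cur acc = acc.reverse ++ [cur.reverse ++ l] := by
  induction fuel generalizing l cur acc with
  | zero =>
    have : l = [] := by cases l <;> simp_all
    subst this; simp [PySem.Chars.splitOn.go]
  | succ n ih =>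
    cases l with
    | nil => simp [PySem.Chars.splitOn.go]
    | cons c t =>
      have hc : ¬ c = '@' := fun h' => hm (by simp [h'])
      simp only [PySem.Chars.splitOn.go]
      rw [if_neg (by simp [List.isPrefixOf]; exact fun h' => hc h'.symm)]
      rw [ih t (c :: cur) acc (fun h' => hm (List.mem_cons_of_mem _ h')) (by simpa using Nat.le_of_succ_le_succ h)]
      simp

-- A-side: splitOn.go on u ++ '@' :: v with '@' in neither part gives the two pieces
theorem pv_split_go_one (fuel : Nat) (u v cur : List Char) (acc : List (List Char))
    (hu : '@' ∉ u) (hv : '@' ∉ v) (h : (u ++ '@' :: v).length ≤ fuel) :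
    PySem.Chars.splitOn.go ['@'] fuel (u ++ '@' :: v) cur acc
      = acc.reverse ++ [cur.reverse ++ u, v] := by
  induction fuel generalizing u cur acc with
  | zero => simp at h
  | succ n ih =>
    cases u with
    | nil =>
      simp only [List.nil_append, PySem.Chars.splitOn.go]
      rw [if_pos (by simp [List.isPrefixOf])]
      simp only [List.length_singleton, List.drop_one, List.tail_cons]
      rw [pv_split_go_none n v [] _ hv (by simp at h; omega)]
      simp
    | cons c u' =>
      have hc : ¬ c = '@' := fun h' => hu (by simp [h'])
      simp only [List.cons_append, PySem.Chars.splitOn.go]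
      rw [if_neg (by simp [List.isPrefixOf]; exact fun h' => hc h'.symm)]
      rw [ih u' (c :: cur) acc (fun h' => hu (List.mem_cons_of_mem _ h')) (by simp at h ⊢; omega)]
      simp

theorem pv_splitOn_one (u v : List Char) (hu : '@' ∉ u) (hv : '@' ∉ v) :
    PySem.Chars.splitOn (u ++ '@' :: v) ['@'] = [u, v] := by
  unfold PySem.Chars.splitOn
  rw [pv_split_go_one _ u v [] [] hu hv (by simp)]
  simp

-- B-side: the scan over a chunk without '@' while no '@' has been seen
theorem pv_scan_no_at_neg (l : List Char) (p a : Int) (d : Bool) (hm : '@' ∉ l) (ha : a < 0) :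
    pvScan l p a d = (a, d, true) := by
  induction l generalizing p with
  | nil => simp [pvScan]
  | cons c t ih =>
    have hc : ¬ c = '@' := fun h' => hm (by simp [h'])
    simp only [pvScan, beq_iff_eq, hc, if_false]
    have : ¬ (c == '.' && decide (0 ≤ a)) = true := by simp; intro _; omega
    rw [if_neg this, ih _ (fun h' => hm (List.mem_cons_of_mem _ h'))]

-- B-side: the scan over a chunk without '@' after the '@' was seen collects the dot flag
theorem pv_scan_no_at_nonneg (l : List Char) (p a : Int) (d : Bool) (hm : '@' ∉ l) (ha : 0 ≤ a) :
    pvScan l p a d = (a, d || decide ('.' ∈ l), true) := by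
  induction l generalizing p d with
  | nil => simp [pvScan]
  | cons c t ih =>
    have hc : ¬ c = '@' := fun h' => hm (by simp [h'])
    have ht : '@' ∉ t := fun h' => hm (List.mem_cons_of_mem _ h')
    simp only [pvScan, beq_iff_eq, hc, if_false]
    by_cases hd : c = '.'
    · subst hd
      rw [if_pos (by simp [ha]), ih _ true ht]
      simp
    · rw [if_neg (by simp [hd]), ih _ d ht]
      have : ¬ '.' = c := fun h' => hd h'.symm
      simp [this]

-- B-side: a second '@' aborts the scan
theorem pv_scan_second_at (l : List Char) (p a : Int) (d : Bool) (hm : '@' ∈ l) (ha : 0 ≤ a) :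
    (pvScan l p a d).2.2 = false := by
  induction l generalizing p d with
  | nil => simp at hm
  | cons c t ih =>
    by_cases hc : c = '@'
    · subst hc
      simp [pvScan, ha]
    · have ht : '@' ∈ t := by cases hm with | head => exact absurd rfl hc | tail _ h => exact h
      simp only [pvScan, beq_iff_eq, hc, if_false]
      by_cases hd : (c == '.' && decide (0 ≤ a)) = true
      · rw [if_pos hd]; exact ih _ _ ht
      · rw [if_neg hd]; exact ih _ _ ht

-- B-side: the scan walks through an '@'-free prefix only advancing the position
theorem pv_scan_skip (u : List Char) (l : List Char) (p a : Int) (d : Bool) (hu : '@' ∉ u) (ha : a < 0) :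
    pvScan (u ++ l) p a d = pvScan l (p + u.length) a d := by
  induction u generalizing p with
  | nil => simp
  | cons c t ih =>
    have hc : ¬ c = '@' := fun h' => hu (by simp [h'])
    simp only [List.cons_append, pvScan, beq_iff_eq, hc, if_false]
    have : ¬ (c == '.' && decide (0 ≤ a)) = true := by simp; intro _; omega
    rw [if_neg this, ih _ (fun h' => hu (List.mem_cons_of_mem _ h'))]
    congr 1
    simp
    omega

-- split a list at the FIRST '@'
theorem pv_first_split (cs : List Char) (h : '@' ∈ cs) :
    ∃ u v, cs = u ++ '@' :: v ∧ '@' ∉ u := by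
  induction cs with
  | nil => simp at h
  | cons c t ih =>
    by_cases hc : c = '@'
    · exact ⟨[], t, by simp [hc], by simp⟩
    · obtain ⟨u, v, rfl, hu⟩ := ih (by cases h with | head => exact absurd rfl hc | tail _ h => exact h)
      exact ⟨c :: u, v, rfl, by simp [hu]; exact fun h' => hc h'.symm⟩

-- per-email equality of A's guard chain and B's scan
theorem pv_ok_eq (s : List Char) : pvAOk s = pvBOk s := by
  by_cases hm : '@' ∈ s
  · obtain ⟨u, v, rfl, hu⟩ := pv_first_split s hm
    have hscan : pvScan (u ++ '@' :: v) 0 (-1) false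
        = pvScan v ((u.length : Int) + 1) (u.length : Int) false := by
      rw [pv_scan_skip u _ 0 (-1) false hu (by norm_num)]
      simp [pvScan]
    by_cases hv : '@' ∈ v
    · have hA : pvAOk (u ++ '@' :: v) = false := by
        have : (u ++ '@' :: v).count '@' ≠ 1 := by
          have := List.count_pos_iff.mpr hv
          simp [List.count_append]
          omega
        have hne : (u ++ '@' :: v).isEmpty = false := by simp
        simp only [pvAOk, hne, Bool.false_eq_true, if_false, pv_count_at]
        rw [if_pos (by simpa [bne_iff_ne] using this)]
      have hB : pvBOk (u ++ '@' :: v) = false := by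
        have := pv_scan_second_at v ((u.length : Int) + 1) (u.length : Int) false hv (by positivity)
        simp [pvBOk, hscan, this]
      rw [hA, hB]
    · have hcnt : (u ++ '@' :: v).count '@' = 1 := by
        simp [List.count_append, List.count_eq_zero.mpr hu, List.count_eq_zero.mpr hv]
      have hsplit := pv_splitOn_one u v hu hv
      have hscan2 : pvScan (u ++ '@' :: v) 0 (-1) false
          = ((u.length : Int), decide ('.' ∈ v), true) := by
        rw [hscan, pv_scan_no_at_nonneg v _ _ false hv (by positivity)]
        simp
      have hisin : PySem.Chars.isIn ['.'] v = decide ('.' ∈ v) := by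
        by_cases h : '.' ∈ v
        · simp [h, (PySem.Chars.isIn_iff_infix _ _).mpr ((List.singleton_infix_iff _ _).mpr h)]
        · simp [h, (PySem.Chars.isIn_eq_false_iff _ _).mpr (fun hh => h ((List.singleton_infix_iff _ _).mp hh))]
      simp only [pvAOk, pvBOk, hscan2, pv_count_at, hcnt, hsplit]
      have hne : (u ++ '@' :: v).isEmpty = false := by simp
      simp only [hne, Bool.false_eq_true, if_false, bne_self_eq_false, List.getD,
        List.getElem?_cons_zero, List.getElem?_cons_succ, Option.getD_some, hisin]
      by_cases hue : u = []
      · subst hue; simp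
      · by_cases hve : v = []
        · subst hve; simp
        · have h1 : 0 < u.length := List.length_pos_iff.mpr hue
          have h2 : 0 < v.length := List.length_pos_iff.mpr hve
          simp [hue, hve]
          intro _
          refine ⟨h1, ?_⟩
          omega
  · have hB : pvBOk s = false := by
      rw [pvBOk]
      rw [pv_scan_no_at_neg s 0 (-1) false hm (by norm_num)]
      simp
    by_cases he : s = []
    · subst he; simp [pvAOk, hB]
    · have : s.count '@' ≠ 1 := by simp [List.count_eq_zero.mpr hm]
      simp [pvAOk, pv_count_at, this, hB, he]

-- ===== VERDICT (by name: the statement is the Claim_ definition above) =====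
theorem count_valid_emails_spec : Claim_equal_count_valid_emails := by
  intro emails _
  unfold Spec_count_valid_emails count_valid_emails count_valid_emails_alt
  simp [pv_ok_eq]
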